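-- pv_equiv track=rewrite | github.com/pimang62/Codingtest | codility/-Flags.py | next_peak
-- ===== SOURCE A (Python) =====
-- def create_peaks(A):
--     N = len(A)
--     peaks = [False] * N
--     for i in range(1, N-1):
--         if A[i] > max(A[i-1], A[i+1]):
--             peaks[i] = True
--     return peaks
--
-- def next_peak(A):
--     N = len(A)
--     peaks = create_peaks(A)
--     nxt = [0]*N
--     nxt[N-1] = -1
--     for i in range(N-2, -1, -1):
--         if peaks[i]:
--             nxt[i] = i
--         else:
--             nxt[i] = nxt[i+1]
--     return nxt
-- ===== SOURCE B (Python) =====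
-- def next_peak(A):
--     N = len(A)
--     P = [i for i in range(1, N - 1) if A[i] > max(A[i-1], A[i+1])]
--     out = []
--     for i in range(N):
--         lo, hi = 0, len(P)
--         while lo < hi:
--             mid = (lo + hi) // 2
--             if P[mid] < i:
--                 lo = mid + 1
--             else:
--                 hi = mid
--         out.append(P[lo] if lo < len(P) else -1)
--     return out
-- ===== Notes on version B (the rewrite author's own statement) =====
-- stated objective: alternative
-- what changed: Replaces A's backward carry over a boolean peaks array by a different data representation: collect the peak indices into a sorted list, then for each position binary-search (hand-written bisect_left) that list for the first peak index >= i.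
import Mathlib
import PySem

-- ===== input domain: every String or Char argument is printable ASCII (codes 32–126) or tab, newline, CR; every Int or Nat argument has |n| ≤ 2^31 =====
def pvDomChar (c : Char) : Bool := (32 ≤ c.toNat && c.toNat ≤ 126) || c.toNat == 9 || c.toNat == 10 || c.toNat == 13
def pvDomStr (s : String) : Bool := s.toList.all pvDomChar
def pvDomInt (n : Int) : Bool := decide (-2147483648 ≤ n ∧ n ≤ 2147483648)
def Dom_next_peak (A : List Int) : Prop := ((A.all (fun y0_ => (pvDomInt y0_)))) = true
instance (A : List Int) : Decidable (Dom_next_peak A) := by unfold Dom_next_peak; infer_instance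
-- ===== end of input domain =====

-- B replaces A's backward carry over a boolean peaks array by a different representation: it collects
-- the peak indices into a sorted list and answers each position by binary search (hand-written
-- bisect_left) for the first peak index ≥ i; an alternative algorithm, not claimed faster.

-- ===== PORT A =====
def create_peaks (A : List Int) : List Bool :=
  let N := A.length
  let peaks := List.replicate N false
  (PySem.List.pyRange 1 ((N : Int) - 1) 1).foldl
    (fun peaks i =>
      if PySem.List.pyGetD A i 0 > max (PySem.List.pyGetD A (i - 1) 0) (PySem.List.pyGetD A (i + 1) 0)
      then PySem.List.pySetD peaks i true else peaks) peaks

def next_peak (A : List Int) : List Int :=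
  let N := A.length
  let peaks := create_peaks A
  let nxt := List.replicate N (0 : Int)
  -- nxt[N-1] = -1 : for A = [] Python raises IndexError here; Pre_ excludes that input
  let nxt := PySem.List.pySetD nxt ((N : Int) - 1) (-1)
  (PySem.List.pyRange ((N : Int) - 2) (-1) (-1)).foldl
    (fun nxt i =>
      if PySem.List.pyGetD peaks i false
      then PySem.List.pySetD nxt i i
      else PySem.List.pySetD nxt i (PySem.List.pyGetD nxt (i + 1) 0)) nxt

-- ===== PORT B =====
-- B's while-loop bisect_left; lo/hi are the Python ints lo, hi (always ≥ 0, so Nat;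
-- (lo + hi) // 2 on nonnegative ints is exactly Nat division); P[mid] has 0 ≤ mid < hi ≤ len(P).
-- The fuel hi - lo only totalizes the while loop: it is an upper bound on its iteration count
-- (each iteration shrinks hi - lo), so the loop body runs exactly as in Python.
def pvBisectLoop (P : List Int) (x : Int) : Nat → Nat → Nat → Nat
  | 0, lo, _hi => lo
  | fuel + 1, lo, hi =>
    if lo < hi then
      let mid := (lo + hi) / 2
      if P.getD mid 0 < x then pvBisectLoop P x fuel (mid + 1) hi else pvBisectLoop P x fuel lo mid
    else lo

def pvBisect (P : List Int) (x : Int) (lo hi : Nat) : Nat := pvBisectLoop P x (hi - lo) lo hi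

def next_peak_alt (A : List Int) : List Int :=
  let N : Int := A.length
  let P := (PySem.List.pyRange 1 (N - 1) 1).foldl
    (fun acc i =>
      if PySem.List.pyGetD A i 0 > max (PySem.List.pyGetD A (i - 1) 0) (PySem.List.pyGetD A (i + 1) 0)
      then acc ++ [i] else acc) []
  (PySem.List.pyRange 0 N 1).foldl
    (fun out i =>
      let lo := pvBisect P i 0 P.length
      out ++ [if lo < P.length then P.getD lo 0 else -1]) []

-- ===== PRECONDITION & SPEC =====
-- Pre_ excludes exactly the empty list, on which A raises IndexError (nxt[N-1] on an empty nxt).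
def Pre_next_peak (A : List Int) : Prop := A ≠ []
instance (A : List Int) : Decidable (Pre_next_peak A) := by unfold Pre_next_peak; infer_instance
def pvWitness_next_peak : List Int := ([1, 3, 2, 4, 1])

def Spec_next_peak (A : List Int) (out : List Int) : Prop := out = next_peak_alt A
instance (A : List Int) (out : List Int) : Decidable (Spec_next_peak A out) := by unfold Spec_next_peak; infer_instance

-- ===== CLAIM (what is proved, stated in full; the proofs are below) =====
def Claim_equal_next_peak : Prop := ∀ (A : List Int), Dom_next_peak A → Pre_next_peak A → Spec_next_peak A (next_peak A)

-- ===== LEMMAS AND PROOFS =====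

/-- The shared peak condition at index `i`. -/
def pvCond (A : List Int) (i : Int) : Bool :=
  decide (1 ≤ i ∧ i ≤ (A.length : Int) - 2 ∧
    PySem.List.pyGetD A i 0 > max (PySem.List.pyGetD A (i - 1) 0) (PySem.List.pyGetD A (i + 1) 0))

/-- Index of the nearest peak at or to the right of `j` (`-1` if none): the common spec. -/
def pvNf (A : List Int) (j : Nat) : Int :=
  if _h : j + 1 < A.length then (if pvCond A (j : Int) then (j : Int) else pvNf A (j + 1)) else -1
termination_by A.length - j
decreasing_by omega

lemma pvNf_eq (A : List Int) (j : Nat) (hj : j < A.length) :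
    pvNf A j = if pvCond A (j : Int) then (j : Int) else pvNf A (j + 1) := by
  rw [pvNf]
  by_cases h : j + 1 < A.length
  · simp [h]
  · have hc : pvCond A (j : Int) = false := by
      simp only [pvCond, decide_eq_false_iff_not]
      rintro ⟨-, h2, -⟩; omega
    have h2 : pvNf A (j + 1) = -1 := by rw [pvNf]; simp; omega
    simp [h, hc, h2]

lemma pvNf_last (A : List Int) (j : Nat) (hj : ¬ j + 1 < A.length) : pvNf A j = -1 := by
  rw [pvNf]; simp [hj]

lemma pvGetD_set {α : Type} (s : List α) (n j : Nat) (v d : α) (hn : n < s.length) :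
    (s.set n v).getD j d = if j = n then v else s.getD j d := by
  simp only [List.getD_eq_getElem?_getD, List.getElem?_set]
  split
  · next h => subst h; simp
  · next h => rw [if_neg (by omega)]

lemma pvGetD_replicate {α : Type} (n j : Nat) (d : α) : (List.replicate n d).getD j d = d := by
  rw [List.getD_eq_getElem?_getD, List.getElem?_replicate]
  split <;> rfl

lemma pvCP_loop_length (A : List Int) : ∀ (l : List Int) (p : List Bool),
    (l.foldl (fun peaks i =>
      if PySem.List.pyGetD A i 0 > max (PySem.List.pyGetD A (i - 1) 0) (PySem.List.pyGetD A (i + 1) 0)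
      then PySem.List.pySetD peaks i true else peaks) p).length = p.length := by
  intro l
  induction l with
  | nil => intro p; rfl
  | cons x xs ih =>
    intro p
    rw [List.foldl_cons, ih]
    split
    · exact PySem.List.length_pySetD p x true
    · rfl

lemma pvCP_loop (A : List Int) : ∀ (t : Nat) (p : List Bool), p.length = A.length →
    (t : Int) ≤ (A.length : Int) - 2 → ∀ (j : Nat),
    ((PySem.List.pyRange 1 (1 + (t : Int)) 1).foldl (fun peaks i =>
      if PySem.List.pyGetD A i 0 > max (PySem.List.pyGetD A (i - 1) 0) (PySem.List.pyGetD A (i + 1) 0)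
      then PySem.List.pySetD peaks i true else peaks) p).getD j false
    = if 1 ≤ (j : Int) ∧ (j : Int) < 1 + (t : Int) ∧
        PySem.List.pyGetD A (j : Int) 0 > max (PySem.List.pyGetD A ((j : Int) - 1) 0) (PySem.List.pyGetD A ((j : Int) + 1) 0)
      then true else p.getD j false := by
  intro t
  induction t with
  | zero =>
    intro p hlen _ j
    rw [show (1 : Int) + ((0 : Nat) : Int) = 1 by norm_num, PySem.List.pyRange_one_eq_nil (le_refl 1)]
    simp only [List.foldl_nil]
    rw [if_neg (by rintro ⟨h1, h2, -⟩; omega)]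
  | succ t ih =>
    intro p hlen ht j
    rw [show (1 : Int) + ((t + 1 : Nat) : Int) = (1 + (t : Int)) + 1 by push_cast; ring,
      PySem.List.pyRange_one_succ_right (by omega), List.foldl_append, List.foldl_cons, List.foldl_nil]
    have hcast : (1 : Int) + (t : Int) = ((1 + t : Nat) : Int) := by push_cast; ring
    set q := (PySem.List.pyRange 1 (1 + (t : Int)) 1).foldl (fun peaks i =>
      if PySem.List.pyGetD A i 0 > max (PySem.List.pyGetD A (i - 1) 0) (PySem.List.pyGetD A (i + 1) 0)
      then PySem.List.pySetD peaks i true else peaks) p with hq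
    have hqlen : q.length = A.length := by rw [hq, pvCP_loop_length, hlen]
    have hqget : ∀ j : Nat, q.getD j false = _ := fun j => ih p hlen (by omega) j
    by_cases hc : PySem.List.pyGetD A (1 + (t : Int)) 0 >
        max (PySem.List.pyGetD A ((1 + (t : Int)) - 1) 0) (PySem.List.pyGetD A ((1 + (t : Int)) + 1) 0)
    · rw [if_pos hc, hcast, PySem.List.pySetD_natCast,
        pvGetD_set q (1 + t) j true false (by omega)]
      by_cases hj : j = 1 + t
      · subst hj
        rw [if_pos rfl, if_pos]
        refine ⟨by push_cast; omega, by push_cast; omega, ?_⟩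
        push_cast
        push_cast at hc
        exact hc
      · rw [if_neg hj, hqget j]
        by_cases hin : 1 ≤ (j : Int) ∧ (j : Int) < 1 + (t : Int) ∧
            PySem.List.pyGetD A (j : Int) 0 > max (PySem.List.pyGetD A ((j : Int) - 1) 0) (PySem.List.pyGetD A ((j : Int) + 1) 0)
        · rw [if_pos hin, if_pos ⟨hin.1, by omega, hin.2.2⟩]
        · rw [if_neg hin, if_neg]
          rintro ⟨h1, h2, h3⟩
          exact hin ⟨h1, by omega, h3⟩
    · rw [if_neg hc, hqget j]
      by_cases hin : 1 ≤ (j : Int) ∧ (j : Int) < 1 + (t : Int) ∧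
          PySem.List.pyGetD A (j : Int) 0 > max (PySem.List.pyGetD A ((j : Int) - 1) 0) (PySem.List.pyGetD A ((j : Int) + 1) 0)
      · rw [if_pos hin, if_pos ⟨hin.1, by omega, hin.2.2⟩]
      · rw [if_neg hin, if_neg]
        rintro ⟨h1, h2, h3⟩
        refine hin ⟨h1, ?_, h3⟩
        rcases lt_or_eq_of_le (by omega : (j : Int) ≤ 1 + (t : Int)) with h | h
        · exact h
        · exfalso; apply hc; rw [← h]; exact h3

/-- create_peaks, characterised. -/
lemma pvCP_getD (A : List Int) (j : Nat) :
    (create_peaks A).getD j false = pvCond A (j : Int) := by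
  unfold create_peaks
  simp only []
  by_cases hN : 2 ≤ A.length
  · have hcast : ((A.length : Int) - 1) = 1 + ((A.length - 2 : Nat) : Int) := by push_cast [hN]; ring
    rw [hcast, pvCP_loop A (A.length - 2) _ (by simp) (by push_cast [hN]; ring_nf; omega) j]
    unfold pvCond
    by_cases hin : 1 ≤ (j : Int) ∧ (j : Int) < 1 + ((A.length - 2 : Nat) : Int) ∧
        PySem.List.pyGetD A (j : Int) 0 > max (PySem.List.pyGetD A ((j : Int) - 1) 0) (PySem.List.pyGetD A ((j : Int) + 1) 0)
    · rw [if_pos hin]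
      have : 1 ≤ (j : Int) ∧ (j : Int) ≤ (A.length : Int) - 2 ∧
          PySem.List.pyGetD A (j : Int) 0 > max (PySem.List.pyGetD A ((j : Int) - 1) 0) (PySem.List.pyGetD A ((j : Int) + 1) 0) :=
        ⟨hin.1, by have := hin.2.1; push_cast [hN] at this ⊢; omega, hin.2.2⟩
      exact (decide_eq_true this).symm
    · rw [if_neg hin]
      have : ¬ (1 ≤ (j : Int) ∧ (j : Int) ≤ (A.length : Int) - 2 ∧
          PySem.List.pyGetD A (j : Int) 0 > max (PySem.List.pyGetD A ((j : Int) - 1) 0) (PySem.List.pyGetD A ((j : Int) + 1) 0)) := by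
        rintro ⟨h1, h2, h3⟩
        exact hin ⟨h1, by push_cast [hN]; omega, h3⟩
      rw [pvGetD_replicate]
      exact (decide_eq_false this).symm
  · rw [PySem.List.pyRange_one_eq_nil (by omega), List.foldl_nil]
    have : ¬ (1 ≤ (j : Int) ∧ (j : Int) ≤ (A.length : Int) - 2 ∧
        PySem.List.pyGetD A (j : Int) 0 > max (PySem.List.pyGetD A ((j : Int) - 1) 0) (PySem.List.pyGetD A ((j : Int) + 1) 0)) := by
      rintro ⟨h1, h2, -⟩; omega
    unfold pvCond
    rw [pvGetD_replicate]
    exact (decide_eq_false this).symm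

/-- A's main loop, characterised. -/
lemma pvA_loop (A : List Int) : ∀ (k : Nat) (s : List Int), k < A.length → s.length = A.length →
    (∀ j, k ≤ j → j < A.length → s.getD j 0 = pvNf A j) →
    ∀ j, j < A.length →
    ((PySem.List.pyRange ((k : Int) - 1) (-1) (-1)).foldl
      (fun nxt i =>
        if PySem.List.pyGetD (create_peaks A) i false
        then PySem.List.pySetD nxt i i
        else PySem.List.pySetD nxt i (PySem.List.pyGetD nxt (i + 1) 0)) s).getD j 0 = pvNf A j := by
  intro k
  induction k with
  | zero =>
    intro s _ _ hs j hj
    rw [show ((0 : Nat) : Int) - 1 = -1 by norm_num,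
      PySem.List.pyRange_neg_one_eq_nil (le_refl (-1)), List.foldl_nil]
    exact hs j (Nat.zero_le j) hj
  | succ k ih =>
    intro s hk hslen hs j hj
    rw [show ((k + 1 : Nat) : Int) - 1 = (k : Nat) by push_cast; ring,
      PySem.List.pyRange_neg_one_cons (by omega : (-1 : Int) < (k : Nat)), List.foldl_cons]
    have hpeak : PySem.List.pyGetD (create_peaks A) (k : Int) false = pvCond A (k : Int) := by
      rw [PySem.List.pyGetD_natCast, pvCP_getD]
    have hread : PySem.List.pyGetD s ((k : Int) + 1) 0 = pvNf A (k + 1) := by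
      rw [show (k : Int) + 1 = ((k + 1 : Nat) : Int) by push_cast; ring,
        PySem.List.pyGetD_natCast]
      exact hs (k + 1) (le_refl _) (by omega)
    set s' := (if PySem.List.pyGetD (create_peaks A) (k : Int) false
      then PySem.List.pySetD s (k : Int) (k : Int)
      else PySem.List.pySetD s (k : Int) (PySem.List.pyGetD s ((k : Int) + 1) 0)) with hs'def
    have hs'eq : s' = s.set k (if pvCond A (k : Int) then (k : Int) else pvNf A (k + 1)) := by
      rw [hs'def, hpeak, hread]
      by_cases hc : pvCond A (k : Int)
      · rw [if_pos hc, if_pos hc, PySem.List.pySetD_natCast]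
      · rw [if_neg (by simp [hc]), if_neg (by simp [hc]), PySem.List.pySetD_natCast]
    have hs'len : s'.length = A.length := by rw [hs'eq, List.length_set, hslen]
    refine ih s' (by omega) hs'len ?_ j hj
    intro j' hj1 hj2
    rw [hs'eq, pvGetD_set s k j' _ 0 (by omega)]
    by_cases hjk : j' = k
    · subst hjk
      rw [if_pos rfl, ← pvNf_eq A j' (by omega)]
    · rw [if_neg hjk]
      exact hs j' (by omega) hj2

lemma pvA_loop_length (A : List Int) : ∀ (l : List Int) (s : List Int),
    (l.foldl
      (fun nxt i =>
        if PySem.List.pyGetD (create_peaks A) i false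
        then PySem.List.pySetD nxt i i
        else PySem.List.pySetD nxt i (PySem.List.pyGetD nxt (i + 1) 0)) s).length = s.length := by
  intro l
  induction l with
  | nil => intro s; rfl
  | cons x xs ih =>
    intro s
    rw [List.foldl_cons, ih]
    split
    · exact PySem.List.length_pySetD s x x
    · exact PySem.List.length_pySetD s x _

lemma pvA_eq (A : List Int) (h : A ≠ []) : next_peak A = (List.range A.length).map (fun j => pvNf A j) := by
  have hN : 1 ≤ A.length := List.length_pos_of_ne_nil h
  unfold next_peak
  simp only []
  have hcast : (A.length : Int) - 1 = ((A.length - 1 : Nat) : Int) := by push_cast [hN]; ring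
  have hcast2 : (A.length : Int) - 2 = ((A.length - 1 : Nat) : Int) - 1 := by push_cast [hN]; ring
  rw [hcast, PySem.List.pySetD_natCast, hcast2]
  set s0 := (List.replicate A.length (0 : Int)).set (A.length - 1) (-1) with hs0
  have hs0len : s0.length = A.length := by simp [hs0]
  have hs0get : ∀ j, A.length - 1 ≤ j → j < A.length → s0.getD j 0 = pvNf A j := by
    intro j h1 h2
    have hj : j = A.length - 1 := by omega
    subst hj
    rw [hs0, pvGetD_set _ _ _ _ _ (by simp; omega), if_pos rfl,
      pvNf_last A (A.length - 1) (by omega)]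
  refine List.ext_getElem (by rw [pvA_loop_length, hs0len]; simp) ?_
  intro j hj1 hj2
  have hlen : _ := pvA_loop_length A (PySem.List.pyRange (((A.length - 1 : Nat) : Int)) (-1) (-1)) s0
  simp only [List.getElem_map, List.getElem_range]
  rw [← List.getD_eq_getElem _ 0, pvA_loop A (A.length - 1) s0 (by omega) hs0len hs0get]
  rw [pvA_loop_length, hs0len] at hj1
  exact hj1

-- ===== B-side lemmas =====

/-- The peak-index list B builds. -/
def pvPL (A : List Int) : List Int :=
  (PySem.List.pyRange 1 ((A.length : Int) - 1) 1).filter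
    (fun i => decide (PySem.List.pyGetD A i 0 > max (PySem.List.pyGetD A (i - 1) 0) (PySem.List.pyGetD A (i + 1) 0)))

lemma pvPL_sorted (A : List Int) : (pvPL A).Pairwise (· ≤ ·) := by
  exact ((PySem.List.pairwise_lt_pyRange_one 1 ((A.length : Int) - 1)).filter _).imp (fun h => le_of_lt h)

lemma pvPL_mem (A : List Int) (e : Int) : e ∈ pvPL A ↔ pvCond A e = true := by
  unfold pvPL pvCond
  rw [List.mem_filter, PySem.List.mem_pyRange_one]
  simp only [decide_eq_true_eq]
  constructor
  · rintro ⟨⟨h1, h2⟩, h3⟩; exact ⟨h1, by omega, h3⟩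
  · rintro ⟨h1, h2, h3⟩; exact ⟨⟨h1, by omega⟩, h3⟩

lemma pvSorted_getD (P : List Int) (hs : P.Pairwise (· ≤ ·)) (j k : Nat) (hjk : j ≤ k)
    (hk : k < P.length) : P.getD j 0 ≤ P.getD k 0 := by
  rw [List.getD_eq_getElem _ 0 (by omega), List.getD_eq_getElem _ 0 hk]
  rcases Nat.lt_or_ge j k with h | h
  · exact List.pairwise_iff_getElem.mp hs j k (by omega) hk h
  · have : j = k := by omega
    subst this; exact le_refl _

lemma pvBisectLoop_spec (P : List Int) (x : Int) (hs : P.Pairwise (· ≤ ·)) :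
    ∀ (fuel : Nat), ∀ (lo hi : Nat), hi - lo ≤ fuel → lo ≤ hi → hi ≤ P.length →
    (∀ j, j < lo → P.getD j 0 < x) → (∀ j, hi ≤ j → j < P.length → x ≤ P.getD j 0) →
    pvBisectLoop P x fuel lo hi ≤ P.length ∧
    (∀ j, j < pvBisectLoop P x fuel lo hi → P.getD j 0 < x) ∧
    (∀ j, pvBisectLoop P x fuel lo hi ≤ j → j < P.length → x ≤ P.getD j 0) := by
  intro fuel
  induction fuel with
  | zero =>
    intro lo hi hfuel hle hhi hpre hsuf
    rw [pvBisectLoop]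
    exact ⟨by omega, hpre, fun j hj hjl => hsuf j (by omega) hjl⟩
  | succ fuel ih =>
    intro lo hi hfuel hle hhi hpre hsuf
    rw [pvBisectLoop]
    by_cases hlt : lo < hi
    · rw [if_pos hlt]
      by_cases hmid : P.getD ((lo + hi) / 2) 0 < x
      · simp only [if_pos hmid]
        refine ih ((lo + hi) / 2 + 1) hi (by omega) (by omega) hhi (fun j hj => ?_) hsuf
        exact lt_of_le_of_lt (pvSorted_getD P hs j ((lo + hi) / 2) (by omega) (by omega)) hmid
      · simp only [if_neg hmid]
        refine ih lo ((lo + hi) / 2) (by omega) (by omega) (by omega) hpre (fun j hj hjl => ?_)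
        exact le_trans (not_lt.mp hmid) (pvSorted_getD P hs ((lo + hi) / 2) j hj hjl)
    · rw [if_neg hlt]
      exact ⟨by omega, hpre, fun j hj hjl => hsuf j (by omega) hjl⟩

lemma pvBisect_spec (P : List Int) (x : Int) (hs : P.Pairwise (· ≤ ·)) :
    ∀ (lo hi : Nat), lo ≤ hi → hi ≤ P.length →
    (∀ j, j < lo → P.getD j 0 < x) → (∀ j, hi ≤ j → j < P.length → x ≤ P.getD j 0) →
    pvBisect P x lo hi ≤ P.length ∧
    (∀ j, j < pvBisect P x lo hi → P.getD j 0 < x) ∧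
    (∀ j, pvBisect P x lo hi ≤ j → j < P.length → x ≤ P.getD j 0) := by
  intro lo hi hle hhi hpre hsuf
  exact pvBisectLoop_spec P x hs (hi - lo) lo hi (le_refl _) hle hhi hpre hsuf

/-- `pvNf A c` is the least element of the peak list that is ≥ c (or −1 when there is none). -/
lemma pvNf_least (A : List Int) : ∀ (c : Nat),
    (pvNf A c = -1 ∧ ∀ e ∈ pvPL A, e < (c : Int)) ∨
    (pvNf A c ∈ pvPL A ∧ (c : Int) ≤ pvNf A c ∧ ∀ e ∈ pvPL A, (c : Int) ≤ e → pvNf A c ≤ e) := by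
  intro c
  induction c using pvNf.induct (A := A) with
  | case1 c h hc =>
    rw [pvNf_eq A c (by omega), if_pos hc]
    exact Or.inr ⟨(pvPL_mem A (c : Int)).mpr hc, le_refl _, fun e _ he => he⟩
  | case2 c h hc ih =>
    rw [pvNf_eq A c (by omega), if_neg hc]
    have hne : ∀ e ∈ pvPL A, e ≠ (c : Int) := by
      intro e he heq
      exact hc (heq ▸ (pvPL_mem A e).mp he)
    rcases ih with ⟨h1, h2⟩ | ⟨h1, h2, h3⟩
    · refine Or.inl ⟨h1, fun e he => ?_⟩
      have := h2 e he
      have := hne e he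
      push_cast at *
      omega
    · refine Or.inr ⟨h1, by push_cast at h2 ⊢; omega, fun e he hce => ?_⟩
      have := hne e he
      exact h3 e he (by push_cast at *; omega)
  | case3 c h =>
    rw [pvNf_last A c h]
    refine Or.inl ⟨rfl, fun e he => ?_⟩
    have := (pvPL_mem A e).mp he
    unfold pvCond at this
    simp only [decide_eq_true_eq] at this
    omega

/-- One entry of B's output equals `pvNf`. -/
lemma pvB_entry (A : List Int) (c : Nat) :
    (if pvBisect (pvPL A) (c : Int) 0 (pvPL A).length < (pvPL A).length
     then (pvPL A).getD (pvBisect (pvPL A) (c : Int) 0 (pvPL A).length) 0 else -1) = pvNf A c := by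
  obtain ⟨hr1, hr2, hr3⟩ := pvBisect_spec (pvPL A) (c : Int) (pvPL_sorted A) 0 (pvPL A).length
    (Nat.zero_le _) (le_refl _) (by omega) (by omega)
  set r := pvBisect (pvPL A) (c : Int) 0 (pvPL A).length with hrdef
  rcases pvNf_least A c with ⟨h1, h2⟩ | ⟨h1, h2, h3⟩
  · rw [h1]
    rw [if_neg]
    intro hlt
    have hmem : (pvPL A).getD r 0 ∈ pvPL A := by
      rw [List.getD_eq_getElem _ 0 hlt]; exact List.getElem_mem hlt
    exact absurd (hr3 r (le_refl _) hlt) (not_le.mpr (h2 _ hmem))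
  · obtain ⟨jm, hjm, hjmv⟩ := List.mem_iff_getElem.mp h1
    have hjmd : (pvPL A).getD jm 0 = pvNf A c := by rw [List.getD_eq_getElem _ 0 hjm, hjmv]
    have hrjm : r ≤ jm := by
      by_contra hcon
      have := hr2 jm (by omega)
      rw [hjmd] at this
      omega
    have hrlt : r < (pvPL A).length := by omega
    rw [if_pos hrlt]
    have hmem : (pvPL A).getD r 0 ∈ pvPL A := by
      rw [List.getD_eq_getElem _ 0 hrlt]; exact List.getElem_mem hrlt
    have hub : (pvPL A).getD r 0 ≤ pvNf A c := by
      rw [← hjmd]; exact pvSorted_getD (pvPL A) (pvPL_sorted A) r jm hrjm hjm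
    have hlb : pvNf A c ≤ (pvPL A).getD r 0 := h3 _ hmem (hr3 r (le_refl _) hrlt)
    omega

lemma pvB_eq (A : List Int) : next_peak_alt A = (List.range A.length).map (fun j => pvNf A j) := by
  unfold next_peak_alt
  simp only []
  rw [PySem.List.foldl_append_ite_eq_filter, List.nil_append,
    PySem.List.foldl_append_singleton_eq_map, List.nil_append]
  rw [PySem.List.pyRange_zero_nat, List.map_map]
  refine List.map_congr_left ?_
  intro c _
  simp only [Function.comp_apply]
  exact pvB_entry A c

-- ===== VERDICT (by name: the statement is the Claim_ definition above) =====
theorem next_peak_spec : Claim_equal_next_peak := by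
  intro A _ hpre
  unfold Spec_next_peak
  rw [pvA_eq A hpre, pvB_eq A]
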